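-- pv_equiv track=rewrite | github.com/Goyatuzo/python-problems | leetcode/1768/merge_strings_alternately.py | merge_strings_alternately
-- ===== SOURCE A (Python) =====
-- def merge_strings_alternately(word1: str, word2: str) -> str:
--     i = 0
--     len1 = len(word1)
--     len2 = len(word2)
--
--     joined = ''
--
--     while i < min(len1, len2):
--         joined += word1[i] + word2[i]
--         i += 1
--
--     if i < len1:
--         joined += word1[i:]
--     else:
--         joined += word2[i:]
--
--     return joined
-- ===== SOURCE B (Python) =====
-- from itertools import zip_longest
--
-- def merge_strings_alternately(word1: str, word2: str) -> str:
--     return ''.join(c1 + c2 for c1, c2 in zip_longest(word1, word2, fillvalue=''))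
-- ===== Notes on version B (the rewrite author's own statement) =====
-- stated objective: faster
-- what changed: Replaced the explicit index-driven while loop with quadratic repeated string concatenation plus a separate tail-append branch by a single padded pass: zip_longest pairs characters (empty fill past the shorter string) and one join builds the result in linear time.
import Mathlib
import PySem

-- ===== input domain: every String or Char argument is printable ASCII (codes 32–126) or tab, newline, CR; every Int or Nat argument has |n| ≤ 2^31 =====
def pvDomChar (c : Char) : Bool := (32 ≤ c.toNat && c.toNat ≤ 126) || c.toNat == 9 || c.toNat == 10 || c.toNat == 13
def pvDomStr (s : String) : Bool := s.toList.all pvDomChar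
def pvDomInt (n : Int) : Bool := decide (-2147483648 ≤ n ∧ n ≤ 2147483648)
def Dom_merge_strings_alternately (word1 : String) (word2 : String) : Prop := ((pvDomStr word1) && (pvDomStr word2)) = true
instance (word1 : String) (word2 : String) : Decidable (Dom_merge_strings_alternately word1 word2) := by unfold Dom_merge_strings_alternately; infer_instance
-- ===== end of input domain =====

-- B replaces the index-driven while loop + tail-copy branch with one uniform padded pass (zip_longest-style interleaving); objective: idiomatic.


-- ===== PORT A =====
-- the while loop and the trailing if/else, over the character lists; getD is exact because
-- i < min len1 len2 guarantees the index is in range, and List.drop i is exact for word[i:] with i ≥ 0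
def pyWhileA (c1 c2 : List Char) (i : Nat) (joined : List Char) : List Char :=
  if i < min c1.length c2.length then
    pyWhileA c1 c2 (i + 1) (joined ++ [c1.getD i ' ', c2.getD i ' '])
  else if i < c1.length then
    joined ++ c1.drop i
  else
    joined ++ c2.drop i
termination_by min c1.length c2.length - i

def merge_strings_alternately (word1 : String) (word2 : String) : String :=
  String.ofList (pyWhileA word1.toList word2.toList 0 [])

-- ===== PORT B =====
-- zip_longest with fillvalue='' then join: the padded pairing is exactly this interleaving recursion
def interleaveB : List Char → List Char → List Char
  | [], ys => ys
  | xs, [] => xs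
  | x :: xs, y :: ys => x :: y :: interleaveB xs ys

def merge_strings_alternately_alt (word1 : String) (word2 : String) : String :=
  String.ofList (interleaveB word1.toList word2.toList)

-- ===== PRECONDITION & SPEC =====
def Spec_merge_strings_alternately (word1 : String) (word2 : String) (out : String) : Prop := out = merge_strings_alternately_alt word1 word2
instance (word1 : String) (word2 : String) (out : String) : Decidable (Spec_merge_strings_alternately word1 word2 out) := by unfold Spec_merge_strings_alternately; infer_instance

-- ===== CLAIM (what is proved, stated in full; the proofs are below) =====
def Claim_equal_merge_strings_alternately : Prop := ∀ (word1 : String) (word2 : String), Dom_merge_strings_alternately word1 word2 → Spec_merge_strings_alternately word1 word2 (merge_strings_alternately word1 word2)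

-- ===== LEMMAS AND PROOFS =====
theorem interleaveB_nil_right (xs : List Char) : interleaveB xs [] = xs := by
  cases xs <;> simp [interleaveB]

theorem pyWhileA_eq (c1 c2 : List Char) (i : Nat) (joined : List Char) :
    pyWhileA c1 c2 i joined = joined ++ interleaveB (c1.drop i) (c2.drop i) := by
  induction i, joined using pyWhileA.induct c1 c2 with
  | case1 i joined h ih =>
    rw [pyWhileA, if_pos h, ih]
    have h1 : i < c1.length := lt_of_lt_of_le h (min_le_left _ _)
    have h2 : i < c2.length := lt_of_lt_of_le h (min_le_right _ _)
    rw [List.drop_eq_getElem_cons h1, List.drop_eq_getElem_cons h2,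
        List.getD_eq_getElem _ _ h1, List.getD_eq_getElem _ _ h2]
    simp [interleaveB]
  | case2 i joined h h1 =>
    rw [pyWhileA, if_neg h, if_pos h1]
    have h2 : c2.length ≤ i := by omega
    rw [List.drop_eq_nil_of_le h2, interleaveB_nil_right]
  | case3 i joined h h1 =>
    rw [pyWhileA, if_neg h, if_neg h1]
    have h2 : c1.length ≤ i := by omega
    rw [List.drop_eq_nil_of_le h2]
    simp [interleaveB]

-- ===== VERDICT (by name: the statement is the Claim_ definition above) =====
theorem merge_strings_alternately_spec : Claim_equal_merge_strings_alternately := by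
  intro w1 w2 _
  unfold Spec_merge_strings_alternately merge_strings_alternately merge_strings_alternately_alt
  rw [pyWhileA_eq]
  simp
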